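-- pv_equiv track=rewrite | github.com/AmroRass/Trading_Bot_AI | decision_audit.py | _reason_code
-- ===== SOURCE A (Python) =====
-- from typing import Dict, Any, Optional, List
--
-- def _reason_code(value: Any) -> str:
--     """
--     Convert text into an algorithm-friendly reason code.
--
--     Example:
--         "Price too extended from EMA9" -> PRICE_TOO_EXTENDED_FROM_EMA9
--     """
--     text = str(value or "").strip().upper()
--
--     if not text:
--         return ""
--
--     cleaned = []
--     previous_was_underscore = False
--
--     for char in text:
--         if char.isalnum():
--             cleaned.append(char)
--             previous_was_underscore = False
--         else:
--             if not previous_was_underscore: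
--                 cleaned.append("_")
--                 previous_was_underscore = True
--
--     code = "".join(cleaned).strip("_")
--     return code[:80]
-- ===== SOURCE B (Python) =====
-- def _reason_code(value):
--     text = str(value or "").strip().upper()
--     runs = []
--     i, n = 0, len(text)
--     while i < n:
--         if text[i].isalnum():
--             j = i
--             while j < n and text[j].isalnum():
--                 j += 1
--             runs.append(text[i:j])
--             i = j
--         else:
--             i += 1
--     return "_".join(runs)[:80]
-- ===== Notes on version B (the rewrite author's own statement) =====
-- stated objective: idiomatic
-- what changed: Replaces the stateful per-character loop with a previous_was_underscore flag plus a final strip of underscores by scanning alphanumeric runs and joining them with single underscores, so the collapse-and-strip behaviour falls out of the join.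
import Mathlib
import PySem

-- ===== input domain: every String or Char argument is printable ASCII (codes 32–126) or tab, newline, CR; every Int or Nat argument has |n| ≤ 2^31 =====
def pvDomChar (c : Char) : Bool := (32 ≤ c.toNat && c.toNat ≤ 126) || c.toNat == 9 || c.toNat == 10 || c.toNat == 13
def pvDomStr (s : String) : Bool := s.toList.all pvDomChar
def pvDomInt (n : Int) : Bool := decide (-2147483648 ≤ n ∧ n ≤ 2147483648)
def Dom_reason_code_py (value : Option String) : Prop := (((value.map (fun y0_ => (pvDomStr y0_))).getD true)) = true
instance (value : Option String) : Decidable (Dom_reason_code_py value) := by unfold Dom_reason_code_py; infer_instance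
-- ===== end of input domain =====

-- B collects the alphanumeric runs and joins them with underscores instead of A's flag-driven
-- per-character loop followed by stripping edge underscores; same O(n), more idiomatic (objective: idiomatic).

-- ===== PORT A =====
def reason_code_py (value : Option String) : String :=
  let text := PySem.Chars.upper (PySem.Chars.strip (value.getD "").toList)
  if text = [] then ""
  else
    let st := text.foldl
      (fun (st : List Char × Bool) c =>
        if PySem.Chars.isalnum c then (st.1 ++ [c], false)
        else if st.2 = false then (st.1 ++ ['_'], true) else st)
      ([], false)
    let code := PySem.Chars.stripChars st.1 ['_']
    String.ofList (PySem.List.slice code none (some 80))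

-- ===== PORT B =====
-- the outer while-loop of Source B: each alphanumeric run becomes one piece, non-alnum chars are skipped
def altRuns : List Char → List (List Char)
  | [] => []
  | c :: r =>
    if PySem.Chars.isalnum c then
      (c :: r.takeWhile PySem.Chars.isalnum) :: altRuns (r.dropWhile PySem.Chars.isalnum)
    else altRuns r
termination_by l => l.length
decreasing_by
  · exact Nat.lt_succ_of_le (List.length_dropWhile_le _ _)
  · exact Nat.lt_succ_self _

def reason_code_py_alt (value : Option String) : String :=
  let text := PySem.Chars.upper (PySem.Chars.strip (value.getD "").toList)
  String.ofList (PySem.List.slice (PySem.Chars.join ['_'] (altRuns text)) none (some 80))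

-- ===== PRECONDITION & SPEC =====
def Spec_reason_code_py (value : Option String) (out : String) : Prop := out = reason_code_py_alt value
instance (value : Option String) (out : String) : Decidable (Spec_reason_code_py value out) := by unfold Spec_reason_code_py; infer_instance

-- ===== CLAIM (what is proved, stated in full; the proofs are below) =====
def Claim_equal_reason_code_py : Prop := ∀ (value : Option String), Dom_reason_code_py value → Spec_reason_code_py value (reason_code_py value)

-- ===== LEMMAS AND PROOFS =====

/-- The output of A's character loop, as a recursion on the text with the flag as parameter. -/
def gClean : Bool → List Char → List Char
  | _, [] => []
  | prev, c :: r =>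
    if PySem.Chars.isalnum c then c :: gClean false r
    else if prev = false then '_' :: gClean true r else gClean true r

/-- The strip predicate of `stripChars _ ['_']`. -/
def pU (c : Char) : Bool := ['_'].contains c

lemma stripChars_eq (s : List Char) :
    PySem.Chars.stripChars s ['_'] = ((s.dropWhile pU).reverse.dropWhile pU).reverse := rfl

lemma altRuns_nil : altRuns [] = [] := by simp [altRuns]

lemma altRuns_cons_alnum {c : Char} {r : List Char} (hc : PySem.Chars.isalnum c = true) :
    altRuns (c :: r) = (c :: r.takeWhile PySem.Chars.isalnum) :: altRuns (r.dropWhile PySem.Chars.isalnum) := by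
  simp [altRuns, hc]

lemma altRuns_cons_not {c : Char} {r : List Char} (hc : PySem.Chars.isalnum c = false) :
    altRuns (c :: r) = altRuns r := by
  simp [altRuns, hc]

lemma foldl_gClean (t : List Char) : ∀ (acc : List Char) (prev : Bool),
    (t.foldl
      (fun (st : List Char × Bool) c =>
        if PySem.Chars.isalnum c then (st.1 ++ [c], false)
        else if st.2 = false then (st.1 ++ ['_'], true) else st)
      (acc, prev)).1 = acc ++ gClean prev t := by
  induction t with
  | nil => intro acc prev; simp [gClean]
  | cons c r ih =>
    intro acc prev
    by_cases hc : PySem.Chars.isalnum c = true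
    · simp [gClean, hc, ih]
    · cases prev <;> simp [gClean, hc, ih]

lemma gClean_true (t : List Char) :
    gClean true t = gClean false (t.dropWhile (fun c => !PySem.Chars.isalnum c)) := by
  induction t with
  | nil => rfl
  | cons c r ih =>
    by_cases hc : PySem.Chars.isalnum c = true
    · simp [gClean, hc]
    · simp [gClean, hc, ih]

lemma gClean_alnum_prefix (A rest : List Char) (h : ∀ c ∈ A, PySem.Chars.isalnum c = true) :
    gClean false (A ++ rest) = A ++ gClean false rest := by
  induction A with
  | nil => rfl
  | cons c a ih =>
    have hc := h c (List.mem_cons_self ..)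
    rw [List.cons_append]
    show (if PySem.Chars.isalnum c then c :: gClean false (a ++ rest) else _) = _
    rw [if_pos hc, ih (fun d hd => h d (List.mem_cons_of_mem _ hd))]
    rfl

lemma altRuns_dropWhile (t : List Char) :
    altRuns (t.dropWhile (fun c => !PySem.Chars.isalnum c)) = altRuns t := by
  induction t with
  | nil => rfl
  | cons c r ih =>
    by_cases hc : PySem.Chars.isalnum c = true
    · simp [hc]
    · have hc' : PySem.Chars.isalnum c = false := by simpa using hc
      simp only [List.dropWhile_cons, hc', Bool.not_false, if_pos]
      rw [ih, altRuns_cons_not hc']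

lemma pU_alnum {c : Char} (h : PySem.Chars.isalnum c = true) : pU c = false := by
  have h' : PySem.Chars.isalnum '_' = false := by decide
  by_cases hc : c = '_'
  · rw [hc] at h; rw [h'] at h; cases h
  · simp [pU, hc]

lemma dropWhile_eq_self_of_all {p : Char → Bool} {l : List Char}
    (h : ∀ x ∈ l, p x = false) : l.dropWhile p = l := by
  cases l with
  | nil => rfl
  | cons x xs => simp [h x (List.mem_cons_self ..)]

lemma dropWhile_ne_nil_of_exists {p : Char → Bool} {l : List Char} {x : Char}
    (hx : x ∈ l) (hp : p x = false) : l.dropWhile p ≠ [] := by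
  induction l with
  | nil => cases hx
  | cons y ys ih =>
    by_cases hy : p y = true
    · simp only [List.dropWhile_cons, hy, if_pos]
      rcases List.mem_cons.mp hx with rfl | hx'
      · rw [hp] at hy; cases hy
      · exact ih hx'
    · simp [hy]

lemma intercalate_cons_of_ne_nil (sep x : List Char) {L : List (List Char)} (h : L ≠ []) :
    List.intercalate sep (x :: L) = x ++ sep ++ List.intercalate sep L := by
  cases L with
  | nil => cases h rfl
  | cons y zs => simp [List.intercalate, List.intersperse]

/-- Main lemma: for any character list, stripping A's collapsed string equals joining B's runs. -/
lemma main_lemma : ∀ (n : ℕ) (t : List Char), t.length ≤ n →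
    PySem.Chars.stripChars (gClean false t) ['_'] = List.intercalate ['_'] (altRuns t) := by
  intro n
  induction n with
  | zero =>
    intro t ht
    have h0 : t = [] := List.eq_nil_of_length_eq_zero (Nat.le_zero.mp ht)
    subst h0
    rw [altRuns_nil]; rfl
  | succ n ih =>
    intro t ht
    cases t with
    | nil => rw [altRuns_nil]; rfl
    | cons c r =>
      by_cases hc : PySem.Chars.isalnum c = true
      · -- alphanumeric run at the front
        obtain ⟨A, hA⟩ : ∃ A, A = r.takeWhile PySem.Chars.isalnum := ⟨_, rfl⟩
        obtain ⟨rest, hrest⟩ : ∃ rr, rr = r.dropWhile PySem.Chars.isalnum := ⟨_, rfl⟩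
        have hr : r = A ++ rest := by rw [hA, hrest, List.takeWhile_append_dropWhile]
        have hAall : ∀ d ∈ A, PySem.Chars.isalnum d = true := fun d hd =>
          List.mem_takeWhile_imp (hA ▸ hd)
        have hg : gClean false (c :: r) = c :: A ++ gClean false rest := by
          show (if PySem.Chars.isalnum c then c :: gClean false r else _) = _
          rw [if_pos hc, hr, gClean_alnum_prefix A rest hAall]; rfl
        have hruns : altRuns (c :: r) = (c :: A) :: altRuns rest := by
          rw [altRuns_cons_alnum hc, ← hA, ← hrest]
        have huA : ∀ x ∈ c :: A, pU x = false := by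
          intro x hx
          rcases List.mem_cons.mp hx with rfl | hx'
          · exact pU_alnum hc
          · exact pU_alnum (hAall x hx')
        cases hrest2 : rest with
        | nil =>
          -- the whole text is one alphanumeric run
          rw [hg, hruns, hrest2]
          show PySem.Chars.stripChars ((c :: A) ++ gClean false []) ['_'] = _
          rw [stripChars_eq]
          rw [show gClean false [] = [] from rfl, List.append_nil]
          rw [dropWhile_eq_self_of_all huA,
              dropWhile_eq_self_of_all (by intro x hx; exact huA x (List.mem_reverse.mp hx))]
          rw [altRuns_nil]
          simp [List.intercalate]
        | cons d r2 =>
          have hd : PySem.Chars.isalnum d = false := by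
            have h1 := List.head?_dropWhile_not PySem.Chars.isalnum r
            rw [← hrest, hrest2] at h1
            simpa using h1
          obtain ⟨r2', hr2'⟩ : ∃ x, x = r2.dropWhile (fun c => !PySem.Chars.isalnum c) := ⟨_, rfl⟩
          have hg2 : gClean false rest = '_' :: gClean false r2' := by
            rw [hrest2]
            show (if PySem.Chars.isalnum d then _ else
              if (false : Bool) = false then '_' :: gClean true r2 else _) = _
            rw [if_neg (by simp [hd]), if_pos rfl, gClean_true, ← hr2']
          have hruns2 : altRuns rest = altRuns r2' := by
            rw [hrest2, altRuns_cons_not hd, hr2', altRuns_dropWhile]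
          have hlen : r2'.length ≤ n := by
            have h1 : r2'.length ≤ r2.length := hr2' ▸ List.length_dropWhile_le _ _
            have h2 : rest.length ≤ r.length := hrest ▸ List.length_dropWhile_le _ _
            have h3 : r.length ≤ n := by simpa using ht
            rw [hrest2] at h2; simp at h2; omega
          have IH := ih r2' hlen
          cases hr2'' : r2' with
          | nil =>
            -- trailing separator only: strip removes it
            rw [hg, hg2, hr2'', hruns, hruns2, hr2'', altRuns_nil, stripChars_eq,
                List.cons_append]
            have h1 : List.dropWhile pU (c :: (A ++ '_' :: gClean false [])) =
                c :: (A ++ '_' :: gClean false []) := by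
              rw [List.dropWhile_cons, if_neg (by simp [huA c (List.mem_cons_self ..)])]
            have h2 : (c :: (A ++ '_' :: gClean false [])).reverse = '_' :: (c :: A).reverse := by
              show (c :: (A ++ ['_'])).reverse = _
              simp
            rw [h1, h2, List.dropWhile_cons, if_pos (by decide),
                dropWhile_eq_self_of_all (fun x hx => huA x (List.mem_reverse.mp hx))]
            simp [List.intercalate]
          | cons e r3 =>
            have he : PySem.Chars.isalnum e = true := by
              have h1 := List.head?_dropWhile_not (fun c => !PySem.Chars.isalnum c) r2
              rw [← hr2', hr2''] at h1
              simpa using h1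
            have hX : gClean false r2' = e :: gClean false r3 := by
              rw [hr2'']
              show (if PySem.Chars.isalnum e then e :: gClean false r3 else _) = _
              rw [if_pos he]
            have hXd : (gClean false r2').dropWhile pU = gClean false r2' := by
              rw [hX, List.dropWhile_cons, if_neg (by simp [pU_alnum he])]
            have heX : e ∈ (gClean false r2').reverse := by
              rw [hX]; simp
            have hYne : (gClean false r2').reverse.dropWhile pU ≠ [] :=
              dropWhile_ne_nil_of_exists heX (pU_alnum he)
            have hRne : altRuns r2' ≠ [] := by
              rw [hr2'', altRuns_cons_alnum he]; simp
            rw [hg, hg2, hruns, hruns2, stripChars_eq, List.cons_append]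
            have hdropAll :
                List.dropWhile pU (c :: (A ++ '_' :: gClean false r2')) =
                  c :: (A ++ '_' :: gClean false r2') := by
              rw [List.dropWhile_cons, if_neg (by simp [huA c (List.mem_cons_self ..)])]
            have hrev : (c :: (A ++ '_' :: gClean false r2')).reverse =
                (gClean false r2').reverse ++ '_' :: (c :: A).reverse := by
              simp
            rw [hdropAll, hrev, List.dropWhile_append,
                if_neg (by simp [List.isEmpty_iff, hYne]),
                intercalate_cons_of_ne_nil _ _ hRne, ← ih r2' hlen, stripChars_eq, hXd]
            simp
      · -- leading non-alphanumeric character is collapsed away on both sides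
        obtain ⟨r', hr'⟩ : ∃ x, x = r.dropWhile (fun c => !PySem.Chars.isalnum c) := ⟨_, rfl⟩
        have hg : gClean false (c :: r) = '_' :: gClean false r' := by
          show (if PySem.Chars.isalnum c then _ else
            if (false : Bool) = false then '_' :: gClean true r else _) = _
          rw [if_neg (by simp [hc]), if_pos rfl, gClean_true, ← hr']
        have hruns : altRuns (c :: r) = altRuns r' := by
          rw [altRuns_cons_not (by simpa using hc), hr', altRuns_dropWhile]
        have hlen : r'.length ≤ n := by
          have h1 : r'.length ≤ r.length := hr' ▸ List.length_dropWhile_le _ _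
          have h3 : r.length ≤ n := by simpa using ht
          omega
        rw [hg, hruns, stripChars_eq, List.dropWhile_cons, if_pos (by decide),
            ← stripChars_eq]
        exact ih r' hlen

-- ===== VERDICT (by name: the statement is the Claim_ definition above) =====
theorem reason_code_py_spec : Claim_equal_reason_code_py := by
  intro value _
  unfold Spec_reason_code_py reason_code_py reason_code_py_alt
  set text := PySem.Chars.upper (PySem.Chars.strip (value.getD "").toList) with htext
  by_cases h : text = []
  · simp [h, altRuns, PySem.Chars.join, List.intercalate, PySem.List.slice]
  · simp only [h, foldl_gClean, List.nil_append, PySem.Chars.join]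
    rw [main_lemma text.length text le_rfl]
    simp
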